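-- pv_equiv track=rewrite | github.com/starkware-libs/sequencer | crates/apollo_propeller/docs/estimate_bandwidth.py | _distinct_publisher_indices
-- ===== SOURCE A (Python) =====
-- def _distinct_publisher_indices(stakes: list[int]) -> list[int]:
--     """Return one index per distinct stake value (deduplication for sweeps)."""
--     seen: set[int] = set()
--     indices: list[int] = []
--     for i, s in enumerate(stakes):
--         if s not in seen:
--             seen.add(s)
--             indices.append(i)
--     return indices
-- ===== SOURCE B (Python) =====
-- def _distinct_publisher_indices(stakes: list[int]) -> list[int]:
--     """Return one index per distinct stake value (deduplication for sweeps)."""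
--     first: dict[int, int] = {}
--     for i in range(len(stakes) - 1, -1, -1):
--         first[stakes[i]] = i
--     return sorted(first.values())
-- ===== Notes on version B (the rewrite author's own statement) =====
-- stated objective: alternative
-- what changed: Replaces the forward seen-set pass (membership test + conditional append) with a backward pass that overwrites a value->index dict so each value ends up with its smallest index, then sorts the collected indices to restore ascending order.
import Mathlib
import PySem

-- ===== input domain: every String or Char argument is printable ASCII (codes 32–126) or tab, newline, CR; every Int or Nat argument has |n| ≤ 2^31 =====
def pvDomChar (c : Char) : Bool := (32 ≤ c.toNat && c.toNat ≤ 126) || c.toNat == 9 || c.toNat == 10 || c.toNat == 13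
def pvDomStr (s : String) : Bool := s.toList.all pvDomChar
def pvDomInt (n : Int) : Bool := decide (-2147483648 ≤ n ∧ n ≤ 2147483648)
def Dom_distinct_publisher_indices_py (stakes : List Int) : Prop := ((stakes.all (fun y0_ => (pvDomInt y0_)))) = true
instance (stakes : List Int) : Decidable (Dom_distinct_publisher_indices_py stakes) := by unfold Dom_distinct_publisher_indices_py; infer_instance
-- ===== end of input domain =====

-- B replaces A's forward seen-set pass by a backward pass overwriting a value->index dict
-- (so each value keeps its smallest index) followed by sorting the values (objective: alternative).

-- ===== PORT A =====
-- loop body: if s not in seen: seen.add(s); indices.append(i)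
def distinct_publisher_indices_py (stakes : List Int) : List Int :=
  ((PySem.List.enumerate stakes 0).foldl
    (fun (st : PySem.Set Int × List Int) p =>
      if PySem.Set.contains st.1 p.2 then st
      else (PySem.Set.add st.1 p.2, st.2 ++ [p.1]))
    (PySem.Set.empty, [])).2

-- ===== PORT B =====
-- for i in range(len(stakes)-1, -1, -1): first[stakes[i]] = i        (index i is always in range,
-- so pyGetD's default is never used);  return sorted(first.values())
def distinct_publisher_indices_py_alt (stakes : List Int) : List Int :=
  PySem.List.sorted
    (PySem.Dict.values
      ((PySem.List.pyRange ((stakes.length : Int) - 1) (-1) (-1)).foldl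
        (fun (d : PySem.Dict Int Int) i => d.insert (PySem.List.pyGetD stakes i 0) i)
        PySem.Dict.empty))
    (fun x => x) false

-- ===== PRECONDITION & SPEC =====
def Spec_distinct_publisher_indices_py (stakes : List Int) (out : List Int) : Prop := out = distinct_publisher_indices_py_alt stakes
instance (stakes : List Int) (out : List Int) : Decidable (Spec_distinct_publisher_indices_py stakes out) := by unfold Spec_distinct_publisher_indices_py; infer_instance

-- ===== CLAIM (what is proved, stated in full; the proofs are below) =====
def Claim_equal_distinct_publisher_indices_py : Prop := ∀ (stakes : List Int), Dom_distinct_publisher_indices_py stakes → Spec_distinct_publisher_indices_py stakes (distinct_publisher_indices_py stakes)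

-- ===== LEMMAS AND PROOFS =====

-- A's fold keeps, as its first component, exactly the set-accumulation of the processed elements.
lemma pv_seen_eq (l : List Int) : ∀ (s : PySem.Set Int) (acc : List Int) (k : Int),
    ((PySem.List.enumerate l k).foldl
      (fun (st : PySem.Set Int × List Int) p =>
        if PySem.Set.contains st.1 p.2 then st
        else (PySem.Set.add st.1 p.2, st.2 ++ [p.1])) (s, acc)).1
    = PySem.Set.update s l := by
  induction l with
  | nil => intro s acc k; simp [PySem.List.enumerate_nil, PySem.Set.update]
  | cons x xs ih =>
    intro s acc k
    rw [PySem.List.enumerate_cons]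
    simp only [List.foldl_cons]
    by_cases h : PySem.Set.contains s x
    · simp only [h, if_true]
      rw [ih]
      simp only [PySem.Set.update, List.foldl_cons]
      congr 1
      have hx : x ∈ s := by simpa [PySem.Set.contains] using h
      simp [PySem.Set.add, hx]
    · simp only [h]
      rw [ih]
      simp only [PySem.Set.update, List.foldl_cons]
      simp

-- A on l ++ [x]: the old result, plus the new index iff x is new.
lemma pv_A_snoc (l : List Int) (x : Int) :
    distinct_publisher_indices_py (l ++ [x])
    = distinct_publisher_indices_py l ++ (if x ∈ l then [] else [(l.length : Int)]) := by
  unfold distinct_publisher_indices_py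
  rw [PySem.List.enumerate_append, List.foldl_append]
  rw [PySem.List.enumerate_cons, PySem.List.enumerate_nil]
  simp only [List.foldl_cons, List.foldl_nil]
  have hseen := pv_seen_eq l PySem.Set.empty [] 0
  set st := ((PySem.List.enumerate l 0).foldl
      (fun (st : PySem.Set Int × List Int) p =>
        if PySem.Set.contains st.1 p.2 then st
        else (PySem.Set.add st.1 p.2, st.2 ++ [p.1])) (PySem.Set.empty, [])) with hst
  have hc : PySem.Set.contains st.1 x = decide (x ∈ l) := by
    rw [hseen]
    simp [PySem.Set.contains, PySem.Set.mem_update, PySem.Set.empty]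
  by_cases h : x ∈ l
  · rw [hc]; simp [h]
  · rw [hc]; simp [h]

-- every index A emits lies in [0, len)
lemma pv_A_bounds (l : List Int) : ∀ j ∈ distinct_publisher_indices_py l, 0 ≤ j ∧ j < (l.length : Int) := by
  induction l using List.reverseRecOn with
  | nil => intro j hj; simp [distinct_publisher_indices_py, PySem.List.enumerate_nil] at hj
  | append_singleton l x ih =>
    intro j hj
    rw [pv_A_snoc] at hj
    rcases List.mem_append.1 hj with h | h
    · obtain ⟨h0, h1⟩ := ih j h
      refine ⟨h0, ?_⟩
      simp only [List.length_append, List.length_cons, List.length_nil]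
      push_cast; omega
    · by_cases hx : x ∈ l <;> simp [hx] at h
      subst h
      simp only [List.length_append, List.length_cons, List.length_nil]
      push_cast; omega

-- A's output is strictly increasing
lemma pv_A_pairwise (l : List Int) : (distinct_publisher_indices_py l).Pairwise (· < ·) := by
  induction l using List.reverseRecOn with
  | nil => simp [distinct_publisher_indices_py, PySem.List.enumerate_nil]
  | append_singleton l x ih =>
    rw [pv_A_snoc]
    apply List.pairwise_append.2
    refine ⟨ih, by by_cases hx : x ∈ l <;> simp [hx], ?_⟩
    intro a ha b hb
    by_cases hx : x ∈ l <;> simp [hx] at hb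
    subst hb
    exact (pv_A_bounds l a ha).2

-- membership in A's output = "n is the first occurrence of its own value"
lemma pv_A_mem (l : List Int) (j : Int) :
    j ∈ distinct_publisher_indices_py l
      ↔ ∃ n : Nat, PySem.List.index? l (l.getD n 0) = some n ∧ j = (n : Int) := by
  induction l using List.reverseRecOn generalizing j with
  | nil => simp [distinct_publisher_indices_py, PySem.List.enumerate_nil, PySem.List.index?_eq_idxOf?]
  | append_singleton l x ih =>
    rw [pv_A_snoc, List.mem_append, ih]
    constructor
    · rintro (⟨n, hn, rfl⟩ | hj)
      · obtain ⟨hk, -, -⟩ := PySem.List.getElem_of_index?_eq_some hn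
        refine ⟨n, ?_, rfl⟩
        have hGD : (l ++ [x]).getD n 0 = l.getD n 0 := by
          rw [List.getD_eq_getElem _ _ hk, List.getD_eq_getElem _ _ (by simp; omega),
            List.getElem_append_left hk]
        have hmem : l.getD n 0 ∈ l := by
          rw [List.getD_eq_getElem _ _ hk]; exact List.getElem_mem hk
        rw [hGD, PySem.List.index?_append_of_mem [x] hmem]
        exact hn
      · by_cases hx : x ∈ l
        · simp [hx] at hj
        · simp only [hx, if_false, List.mem_singleton] at hj
          subst hj
          refine ⟨l.length, ?_, rfl⟩
          have hx' : (l ++ [x]).getD l.length 0 = x := by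
            rw [List.getD_eq_getElem _ _ (by simp)]; simp
          rw [hx']
          exact PySem.List.index?_append_singleton_self l x hx
    · rintro ⟨n, hn, rfl⟩
      obtain ⟨hk, hget, -⟩ := PySem.List.getElem_of_index?_eq_some hn
      by_cases hlt : n < l.length
      · left
        refine ⟨n, ?_, rfl⟩
        have hGD : (l ++ [x]).getD n 0 = l.getD n 0 := by
          rw [List.getD_eq_getElem _ _ hlt, List.getD_eq_getElem _ _ (by simp; omega),
            List.getElem_append_left hlt]
        have hmem : l.getD n 0 ∈ l := by
          rw [List.getD_eq_getElem _ _ hlt]; exact List.getElem_mem hlt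
        rw [hGD, PySem.List.index?_append_of_mem [x] hmem] at hn
        exact hn
      · have hne : n = l.length := by simp at hk; omega
        subst hne
        have hx' : (l ++ [x]).getD l.length 0 = x := by
          rw [List.getD_eq_getElem _ _ (by simp)]; simp
        rw [hx'] at hn
        by_cases hx : x ∈ l
        · rw [PySem.List.index?_append_of_mem [x] hx] at hn
          obtain ⟨hk2, -, -⟩ := PySem.List.getElem_of_index?_eq_some hn
          omega
        · right; simp [hx]

-- ----- B side -----

-- the dict built by the backward pass, as a structural recursion from the front:
-- process x last (insert overwrites whatever the suffix inserted for x)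
def pvBd : List Int → Int → PySem.Dict Int Int
  | [], _ => PySem.Dict.empty
  | x :: xs, k => (pvBd xs (k + 1)).insert x k

-- the port's backward fold over indices is pvBd
lemma pv_fold_bd (full : List Int) : ∀ (xs pre : List Int), full = pre ++ xs →
    (PySem.List.pyRange ((pre.length : Int)) ((full.length : Int)) 1).foldr
      (fun i d => PySem.Dict.insert d (PySem.List.pyGetD full i 0) i) PySem.Dict.empty
    = pvBd xs (pre.length : Int) := by
  intro xs
  induction xs with
  | nil =>
    intro pre h
    rw [PySem.List.pyRange_one_eq_nil (by subst h; simp)]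
    simp [pvBd]
  | cons x xs ih =>
    intro pre h
    have hlen : (pre.length : Int) < (full.length : Int) := by
      subst h; simp only [List.length_append, List.length_cons]; push_cast; omega
    rw [PySem.List.pyRange_one_cons hlen]
    simp only [List.foldr_cons]
    have hrec := ih (pre ++ [x]) (by rw [h, List.append_assoc]; rfl)
    have hlen2 : (((pre ++ [x]).length : Nat) : Int) = (pre.length : Int) + 1 := by simp
    rw [hlen2] at hrec
    rw [hrec]
    have hget : PySem.List.pyGetD full ((pre.length : Int)) 0 = x := by
      subst h
      rw [PySem.List.pyGetD_of_nonneg _ _ (Int.natCast_nonneg _)]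
      simp [List.getD_eq_getElem?_getD]
    rw [hget]
    rfl

lemma pv_alt_eq_bd (stakes : List Int) :
    distinct_publisher_indices_py_alt stakes
    = PySem.List.sorted (PySem.Dict.values (pvBd stakes 0)) (fun x => x) false := by
  unfold distinct_publisher_indices_py_alt
  have h1 : PySem.List.pyRange ((stakes.length : Int) - 1) (-1) (-1)
      = (PySem.List.pyRange 0 (stakes.length : Int) 1).reverse := by
    rw [PySem.List.pyRange_neg_one_eq_reverse]; norm_num
  rw [h1, List.foldl_reverse]
  have h2 := pv_fold_bd stakes stakes [] rfl
  simp only [List.length_nil, Nat.cast_zero] at h2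
  rw [h2]

lemma pv_bd_get? (xs : List Int) : ∀ (k v : Int),
    (pvBd xs k).get? v = (PySem.List.index? xs v).map (fun n : Nat => ((n : Int) + k)) := by
  induction xs with
  | nil => intro k v; simp [pvBd, PySem.Dict.get?_empty, PySem.List.index?_eq_idxOf?]
  | cons x xs ih =>
    intro k v
    simp only [pvBd]
    rw [PySem.Dict.get?_insert]
    by_cases h : v = x
    · subst h
      rw [if_pos rfl, PySem.List.index?_cons_self]
      simp
    · rw [if_neg h, ih, PySem.List.index?_cons_of_ne xs (Ne.symm h)]
      cases PySem.List.index? xs v with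
      | none => simp
      | some n =>
        simp only [Option.map_some, Option.some.injEq]
        push_cast; ring

lemma pv_bd_keys_nodup (xs : List Int) : ∀ k, ((pvBd xs k).keys).Nodup := by
  induction xs with
  | nil => intro k; simp [pvBd, PySem.Dict.keys_empty]
  | cons x xs ih =>
    intro k
    exact PySem.Dict.nodup_keys_insert _ _ _ (ih (k + 1))

lemma pv_bd_values_mem (xs : List Int) (j : Int) :
    j ∈ (pvBd xs 0).values ↔ ∃ n : Nat, PySem.List.index? xs (xs.getD n 0) = some n ∧ j = (n : Int) := by
  constructor
  · intro hj
    simp only [PySem.Dict.values, List.mem_map] at hj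
    obtain ⟨p, hp, rfl⟩ := hj
    have hp' : (p.1, p.2) ∈ (pvBd xs 0).items := by simpa using hp
    have hg : (pvBd xs 0).get? p.1 = some p.2 :=
      PySem.Dict.get?_of_mem_items _ hp' (pv_bd_keys_nodup xs 0)
    rw [pv_bd_get? xs 0 p.1] at hg
    cases hidx : PySem.List.index? xs p.1 with
    | none => rw [hidx] at hg; simp at hg
    | some n =>
      rw [hidx] at hg
      simp only [Option.map_some, Option.some.injEq] at hg
      obtain ⟨hk, hget, -⟩ := PySem.List.getElem_of_index?_eq_some hidx
      refine ⟨n, ?_, by omega⟩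
      rw [List.getD_eq_getElem _ _ hk, hget]
      exact hidx
  · rintro ⟨n, hn, rfl⟩
    have hg : (pvBd xs 0).get? (xs.getD n 0) = some ((n : Int) + 0) := by
      rw [pv_bd_get?, hn]; rfl
    have hmem := PySem.Dict.mem_items_of_get?_eq_some _ hg
    simp only [PySem.Dict.values, List.mem_map]
    exact ⟨_, hmem, by simp⟩

lemma pv_bd_values_nodup (xs : List Int) : ((pvBd xs 0).values).Nodup := by
  have hkeys := pv_bd_keys_nodup xs 0
  have hitems : ((pvBd xs 0).items).Nodup := by
    have : (((pvBd xs 0).items).map (fun p => p.1)).Nodup := by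
      simpa [PySem.Dict.keys] using hkeys
    exact List.Nodup.of_map _ this
  simp only [PySem.Dict.values]
  refine List.Nodup.map_on ?_ hitems
  intro p hp q hq hpq
  have hp' : (p.1, p.2) ∈ (pvBd xs 0).items := by simpa using hp
  have hq' : (q.1, q.2) ∈ (pvBd xs 0).items := by simpa using hq
  have hgp := PySem.Dict.get?_of_mem_items _ hp' hkeys
  have hgq := PySem.Dict.get?_of_mem_items _ hq' hkeys
  rw [pv_bd_get?] at hgp hgq
  cases hip : PySem.List.index? xs p.1 with
  | none => rw [hip] at hgp; simp at hgp
  | some np =>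
    cases hiq : PySem.List.index? xs q.1 with
    | none => rw [hiq] at hgq; simp at hgq
    | some nq =>
      rw [hip] at hgp; rw [hiq] at hgq
      simp only [Option.map_some, Option.some.injEq] at hgp hgq
      have hnpq : np = nq := by omega
      obtain ⟨hkp, hgetp, -⟩ := PySem.List.getElem_of_index?_eq_some hip
      obtain ⟨hkq, hgetq, -⟩ := PySem.List.getElem_of_index?_eq_some hiq
      subst hnpq
      have h1 : p.1 = q.1 := by rw [← hgetp, ← hgetq]
      exact Prod.ext h1 hpq

-- the two recurrences coincide, so the programs do
lemma pv_eq (stakes : List Int) :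
    distinct_publisher_indices_py stakes = distinct_publisher_indices_py_alt stakes := by
  rw [pv_alt_eq_bd]
  have hperm : (distinct_publisher_indices_py stakes).Perm ((pvBd stakes 0).values) := by
    refine (List.perm_ext_iff_of_nodup ?_ ?_).2 ?_
    · exact (pv_A_pairwise stakes).nodup
    · exact pv_bd_values_nodup stakes
    · intro j; rw [pv_A_mem, pv_bd_values_mem]
  exact Eq.symm (PySem.List.sorted_eq_of_perm_of_pairwise_lt _ _ _ hperm (pv_A_pairwise stakes))

-- ===== VERDICT (by name: the statement is the Claim_ definition above) =====
theorem distinct_publisher_indices_py_spec : Claim_equal_distinct_publisher_indices_py := by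
  intro stakes _
  unfold Spec_distinct_publisher_indices_py
  exact pv_eq stakes
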